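-- pv_equiv track=rewrite | github.com/elissoncardoso1/Bhub_python | bhub-backend-python/app/services/pdf_service.py | _parse_authors_string
-- ===== SOURCE A (Python) =====
-- def _parse_authors_string(authors_str: str) -> list[str]:
--     """Parse string de autores em lista."""
--     if not authors_str:
--         return []
--
--     # Separadores comuns
--     separators = [";", " and ", " & ", ","]
--
--     authors = [authors_str]
--     for sep in separators:
--         new_authors = []
--         for a in authors:
--             new_authors.extend(a.split(sep))
--         authors = new_authors
--
--     # Limpar e filtrar
--     cleaned = []
--     for a in authors:
--         a = a.strip()
--         if a and len(a) > 2: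
--             cleaned.append(a)
--
--     return cleaned[:20]
-- ===== SOURCE B (Python) =====
-- def _parse_authors_string(authors_str: str) -> list[str]:
--     """Parse string de autores em lista."""
--     if not authors_str:
--         return []
--
--     # Normalize every separator to a semicolon (none of the separators
--     # contains a semicolon, so order does not matter), then split once.
--     normalized = authors_str.replace(" and ", ";").replace(" & ", ";").replace(",", ";")
--
--     cleaned = [t for t in (tok.strip() for tok in normalized.split(";")) if t and len(t) > 2]
--     return cleaned[:20]
-- ===== Notes on version B (the rewrite author's own statement) =====
-- stated objective: idiomatic
-- what changed: Instead of repeatedly re-splitting a growing list of fragments on each of the four separators, B normalizes all separators to a single semicolon with three str.replace passes and splits the string once, then cleans with a comprehension.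
import Mathlib
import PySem

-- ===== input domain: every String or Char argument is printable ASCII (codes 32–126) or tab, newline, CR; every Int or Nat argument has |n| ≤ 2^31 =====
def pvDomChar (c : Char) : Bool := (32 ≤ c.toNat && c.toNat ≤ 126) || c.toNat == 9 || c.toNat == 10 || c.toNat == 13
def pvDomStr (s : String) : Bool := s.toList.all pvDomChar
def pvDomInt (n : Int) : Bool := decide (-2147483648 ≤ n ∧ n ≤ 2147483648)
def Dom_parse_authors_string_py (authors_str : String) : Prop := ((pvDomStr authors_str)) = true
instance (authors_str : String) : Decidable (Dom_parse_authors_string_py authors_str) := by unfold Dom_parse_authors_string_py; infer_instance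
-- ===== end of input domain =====

-- B replaces A's repeated re-splitting of a fragment list on four separators by
-- normalizing every separator to a single semicolon and splitting once (idiomatic).

-- a.split(sep) for a nonempty literal sep (split? is always `some` there)
def pySplitPy (s sep : String) : List String := (PySem.Str.split? s sep).getD []

-- ===== PORT A =====
def parse_authors_string_py (authors_str : String) : List String :=
  if authors_str = "" then []
  else
    let separators : List String := [";", " and ", " & ", ","]
    let authors := separators.foldl
      (fun authors sep => authors.foldl (fun new_authors a => new_authors ++ pySplitPy a sep) [])
      [authors_str]
    let cleaned := authors.foldl
      (fun cleaned a =>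
        let a' := PySem.Str.strip a
        if a' ≠ "" ∧ 2 < PySem.Str.len a' then cleaned ++ [a'] else cleaned) []
    PySem.List.slice cleaned none (some 20)

-- ===== PORT B =====
def parse_authors_string_py_alt (authors_str : String) : List String :=
  if authors_str = "" then []
  else
    let normalized := PySem.Str.replace
      (PySem.Str.replace (PySem.Str.replace authors_str " and " ";") " & " ";") "," ";"
    let cleaned := (pySplitPy normalized ";").filterMap
      (fun tok =>
        let t := PySem.Str.strip tok
        if t ≠ "" ∧ 2 < PySem.Str.len t then some t else none)
    PySem.List.slice cleaned none (some 20)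

-- ===== PRECONDITION & SPEC =====
def Spec_parse_authors_string_py (authors_str : String) (out : List String) : Prop := out = parse_authors_string_py_alt authors_str
instance (authors_str : String) (out : List String) : Decidable (Spec_parse_authors_string_py authors_str out) := by unfold Spec_parse_authors_string_py; infer_instance

-- ===== CLAIM (what is proved, stated in full; the proofs are below) =====
def Claim_equal_parse_authors_string_py : Prop := ∀ (authors_str : String), Dom_parse_authors_string_py authors_str → Spec_parse_authors_string_py authors_str (parse_authors_string_py authors_str)

-- ===== LEMMAS AND PROOFS =====

lemma modifyHead_id' {α : Type} (l : List α) : l.modifyHead (fun x => x) = l := by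
  cases l <;> simp

-- reference recursion for s.split(sep), sep ≠ []
def solC (sep : List Char) : List Char → List (List Char)
  | [] => [[]]
  | x :: t =>
    if h : sep.isPrefixOf (x :: t) ∧ sep ≠ [] then [] :: solC sep ((x :: t).drop sep.length)
    else (solC sep t).modifyHead (x :: ·)
termination_by l => l.length
decreasing_by
  · have : 1 ≤ sep.length := List.length_pos_of_ne_nil h.2
    simp; omega
  · simp

-- reference recursion for s.replace(old, new), old ≠ []
def replC (old new : List Char) : List Char → List Char
  | [] => []
  | x :: t =>
    if h : old.isPrefixOf (x :: t) ∧ old ≠ [] then new ++ replC old new ((x :: t).drop old.length)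
    else x :: replC old new t
termination_by l => l.length
decreasing_by
  · have : 1 ≤ old.length := List.length_pos_of_ne_nil h.2
    simp; omega
  · simp

lemma splitOn_go_eq (sep : List Char) (hs : sep ≠ []) :
    ∀ (fuel : Nat) (l cur : List Char) (acc : List (List Char)), l.length < fuel →
      PySem.Chars.splitOn.go sep fuel l cur acc
        = acc.reverse ++ ((solC sep l).modifyHead (cur.reverse ++ ·)) := by
  intro fuel
  induction fuel with
  | zero => intro l cur acc h; omega
  | succ n ih =>
    intro l cur acc h
    match l with
    | [] => simp [PySem.Chars.splitOn.go, solC]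
    | c :: rest =>
      rw [PySem.Chars.splitOn.go]
      by_cases hp : sep.isPrefixOf (c :: rest)
      · have hlen : 1 ≤ sep.length := List.length_pos_of_ne_nil hs
        rw [if_pos hp, ih _ _ _ (by simp at h ⊢; omega)]
        rw [solC, dif_pos ⟨hp, hs⟩]
        simp [modifyHead_id']
      · rw [if_neg hp, ih _ _ _ (by simp at h ⊢; omega)]
        rw [solC, dif_neg (by tauto)]
        simp [List.modifyHead_modifyHead, Function.comp_def]

lemma splitOn_eq_solC (l sep : List Char) (hs : sep ≠ []) :
    PySem.Chars.splitOn l sep = solC sep l := by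
  rw [PySem.Chars.splitOn, splitOn_go_eq sep hs _ _ _ _ (by omega)]
  simp [modifyHead_id']

lemma replace_go_eq (old new : List Char) (ho : old ≠ []) :
    ∀ (fuel : Nat) (l acc : List Char), l.length ≤ fuel →
      PySem.Chars.replace.go old new fuel l acc = acc.reverse ++ replC old new l := by
  intro fuel
  induction fuel with
  | zero =>
    intro l acc h
    have : l = [] := List.eq_nil_of_length_eq_zero (by omega)
    subst this; simp [PySem.Chars.replace.go, replC]
  | succ n ih =>
    intro l acc h
    match l with
    | [] => simp [PySem.Chars.replace.go, replC]
    | c :: rest =>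
      rw [PySem.Chars.replace.go]
      by_cases hp : old.isPrefixOf (c :: rest)
      · have hlen : 1 ≤ old.length := List.length_pos_of_ne_nil ho
        rw [if_pos hp, ih _ _ (by simp at h ⊢; omega)]
        rw [replC, dif_pos ⟨hp, ho⟩]
        simp
      · rw [if_neg hp, ih _ _ (by simp at h ⊢; omega)]
        rw [replC, dif_neg (by tauto)]
        simp

lemma replace_eq_replC (l old new : List Char) (ho : old ≠ []) :
    PySem.Chars.replace l old new = replC old new l := by
  rw [PySem.Chars.replace, if_neg (by simp [List.isEmpty_iff, ho]),
    replace_go_eq old new ho _ _ _ (by omega)]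
  simp

lemma solC_singleton_cons (c x : Char) (t : List Char) :
    solC [c] (x :: t) = if x = c then [] :: solC [c] t
      else (solC [c] t).modifyHead (x :: ·) := by
  rw [solC]
  by_cases hx : x = c
  · rw [dif_pos ⟨by simp [hx, List.isPrefixOf], by simp⟩, if_pos hx]
    simp
  · rw [dif_neg (by simp [List.isPrefixOf]; exact fun h => absurd h.symm hx), if_neg hx]

lemma solC_ne_nil (sep l) : solC sep l ≠ [] := by
  induction l using solC.induct sep with
  | case1 => simp [solC]
  | case2 x t h ih => rw [solC, dif_pos h]; simp
  | case3 x t h ih =>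
    rw [solC, dif_neg h]
    cases hq : solC sep t with
    | nil => exact absurd hq ih
    | cons q qs => simp

lemma solC_head_prefix (c : Char) (l : List Char) (q : List Char) (qs : List (List Char))
    (h : solC [c] l = q :: qs) : q <+: l := by
  induction l generalizing q qs with
  | nil =>
    rw [solC] at h
    simp at h
    simp [h.1]
  | cons x t ih =>
    rw [solC_singleton_cons] at h
    obtain ⟨p, ps, hps⟩ := List.exists_cons_of_ne_nil (solC_ne_nil [c] t)
    by_cases hx : x = c
    · rw [if_pos hx] at h
      obtain ⟨h1, -⟩ := List.cons_eq_cons.mp h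
      simp [← h1]
    · rw [if_neg hx, hps] at h
      simp only [List.modifyHead_cons] at h
      obtain ⟨h1, h2⟩ := List.cons_eq_cons.mp h
      subst h1
      exact List.cons_prefix_cons.mpr ⟨rfl, ih p ps hps⟩

-- a c-free prefix of the string lands inside the first piece of the split on c
lemma solC_pullout (c : Char) (u v : List Char) (hu : c ∉ u) :
    solC [c] (u ++ v) = (solC [c] v).modifyHead (u ++ ·) := by
  induction u with
  | nil =>
    cases hq : solC [c] v with
    | nil => exact absurd hq (solC_ne_nil _ _)
    | cons q qs => simp [hq]
  | cons x u ih =>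
    have hx : x ≠ c := by simp at hu; tauto
    rw [List.cons_append, solC_singleton_cons, if_neg hx, ih (by simp at hu; tauto),
      List.modifyHead_modifyHead]
    rfl

lemma solC_prefix_split (old p : List Char) (ho : old ≠ []) :
    solC old (old ++ p) = [] :: solC old p := by
  obtain ⟨o, ot, rfl⟩ := List.exists_cons_of_ne_nil ho
  rw [List.cons_append, solC,
    dif_pos ⟨by rw [← List.cons_append]; exact List.isPrefixOf_iff_prefix.mpr (List.prefix_append _ _), by simp⟩]
  simp

-- core: splitting on c after replacing old by c = splitting on c, then each piece on old
lemma core (c : Char) (old : List Char) (ho : old ≠ []) (hc : c ∉ old) (l : List Char) :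
    solC [c] (replC old [c] l) = (solC [c] l).flatMap (fun a => solC old a) := by
  induction l using solC.induct old with
  | case1 => simp [replC, solC]
  | case2 x t h ih =>
    obtain ⟨d, hd⟩ := List.isPrefixOf_iff_prefix.mp h.1
    have hdrop : (x :: t).drop old.length = d := by rw [← hd]; simp
    rw [hdrop] at ih
    rw [replC, dif_pos h, hdrop]
    rw [List.singleton_append, solC_singleton_cons, if_pos rfl, ih]
    rw [← hd, solC_pullout c old d hc]
    obtain ⟨p, ps, hps⟩ := List.exists_cons_of_ne_nil (solC_ne_nil [c] d)
    rw [hps]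
    simp only [List.modifyHead_cons, List.flatMap_cons, solC_prefix_split old p ho]
    simp
  | case3 x t h ih =>
    have hnp : ¬ old.isPrefixOf (x :: t) := by tauto
    rw [replC, dif_neg h]
    by_cases hx : x = c
    · subst hx
      rw [solC_singleton_cons, if_pos rfl, ih, solC_singleton_cons, if_pos rfl]
      simp [solC]
    · rw [solC_singleton_cons, if_neg hx, ih, solC_singleton_cons, if_neg hx]
      obtain ⟨q, qs, hqs⟩ := List.exists_cons_of_ne_nil (solC_ne_nil [c] t)
      have hq : q <+: t := solC_head_prefix c t q qs hqs
      have hnp' : ¬ (old.isPrefixOf (x :: q) ∧ old ≠ []) := by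
        rintro ⟨hpp, -⟩
        exact hnp (List.isPrefixOf_iff_prefix.mpr
          ((List.isPrefixOf_iff_prefix.mp hpp).trans (List.cons_prefix_cons.mpr ⟨rfl, hq⟩)))
      rw [hqs]
      simp only [List.modifyHead_cons, List.flatMap_cons]
      rw [solC, dif_neg hnp']
      obtain ⟨r, rs, hrs⟩ := List.exists_cons_of_ne_nil (solC_ne_nil old q)
      rw [hrs]
      simp

lemma pySplitPy_eq (s sep : String) (hs : sep.toList ≠ []) :
    pySplitPy s sep = (solC sep.toList s.toList).map String.ofList := by
  have h := PySem.Str.split?_map s sep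
  rw [PySem.Chars.split?, if_neg (by simp [List.isEmpty_iff, hs]),
    splitOn_eq_solC _ _ hs] at h
  cases hq : PySem.Str.split? s sep with
  | none => rw [hq] at h; simp at h
  | some L =>
    rw [hq] at h
    simp only [Option.map_some, Option.some.injEq] at h
    have : L = (L.map String.toList).map String.ofList := by
      simp [List.map_map, Function.comp_def]
    rw [pySplitPy, hq, Option.getD_some, this, h]

lemma flatMap_ofList (X : List (List Char)) (g : List Char → List (List Char)) :
    (X.map String.ofList).flatMap (fun a => (g a.toList).map String.ofList)
      = (X.flatMap g).map String.ofList := by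
  induction X with
  | nil => simp
  | cons x X ih => simp [String.toList_ofList, ih]

lemma clean_foldl_eq_filterMap (L acc : List String) :
    L.foldl (fun cleaned a =>
        let a' := PySem.Str.strip a
        if a' ≠ "" ∧ 2 < PySem.Str.len a' then cleaned ++ [a'] else cleaned) acc
      = acc ++ L.filterMap (fun tok =>
          let t := PySem.Str.strip tok
          if t ≠ "" ∧ 2 < PySem.Str.len t then some t else none) := by
  induction L generalizing acc with
  | nil => simp
  | cons a L ih =>
    simp only [List.foldl_cons, List.filterMap_cons]
    split_ifs with hcond
    · rw [ih]; simp
    · rw [ih]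

-- the token lists agree before cleaning
lemma tokens_eq (s : String) :
    (((pySplitPy s ";").flatMap (fun a => pySplitPy a " and ")).flatMap
        (fun a => pySplitPy a " & ")).flatMap (fun a => pySplitPy a ",")
      = pySplitPy (PySem.Str.replace
          (PySem.Str.replace (PySem.Str.replace s " and " ";") " & " ";") "," ";") ";" := by
  have hA : (" and ".toList : List Char) ≠ [] := by decide
  have hB : (" & ".toList : List Char) ≠ [] := by decide
  have hC : (",".toList : List Char) ≠ [] := by decide
  have hS : (";".toList : List Char) ≠ [] := by decide
  have hcA : ';' ∉ " and ".toList := by decide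
  have hcB : ';' ∉ " & ".toList := by decide
  have hcC : ';' ∉ ",".toList := by decide
  have hsem : (";".toList : List Char) = [';'] := by decide
  rw [pySplitPy_eq s ";" hS, pySplitPy_eq _ _ hS]
  simp only [PySem.Str.toList_replace]
  rw [replace_eq_replC _ _ _ hA, replace_eq_replC _ _ _ hB, replace_eq_replC _ _ _ hC]
  rw [hsem]
  rw [core ';' ",".toList hC hcC, core ';' " & ".toList hB hcB, core ';' " and ".toList hA hcA]
  simp only [pySplitPy_eq _ " and " hA, pySplitPy_eq _ " & " hB, pySplitPy_eq _ "," hC]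
  rw [flatMap_ofList, flatMap_ofList, flatMap_ofList]

-- ===== VERDICT (by name: the statement is the Claim_ definition above) =====
theorem parse_authors_string_py_spec : Claim_equal_parse_authors_string_py := by
  intro s _
  unfold Spec_parse_authors_string_py
  by_cases h0 : s = ""
  · simp [parse_authors_string_py, parse_authors_string_py_alt, h0]
  · simp only [parse_authors_string_py, parse_authors_string_py_alt, if_neg h0]
    simp only [List.foldl_cons, List.foldl_nil]
    simp only [PySem.List.foldl_append_eq_flatMap, List.nil_append]
    rw [clean_foldl_eq_filterMap, List.nil_append, tokens_eq s]
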